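-- pv_equiv track=rewrite | github.com/zhangchunbao515/leetcode | leetcode-04/solutions/python3/0661.py | helper
-- ===== SOURCE A (Python) =====
-- from typing import List
--
-- def helper(M: List[List[int]], x: int, y: int) -> int:
--     sum = 0
--     count = 0
--
--     for i in range(-1, 2):
--         for j in range(-1, 2):
--             if x + i < 0 or x + i >= len(M) or \
--                y + j < 0 or y + j >= len(M[0]):
--                 continue
--             count += 1
--             sum += M[x + i][y + j]
--
--     return sum // count
-- ===== SOURCE B (Python) =====
-- def helper(M, x, y):
--     n = len(M[0])
--     total = 0
--     count = 0
--     for row in M[max(0, x - 1):x + 2]: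
--         cells = row[max(0, y - 1):min(y + 2, n)]
--         total += sum(cells)
--         count += len(cells)
--     return total // count
-- ===== Notes on version B (the rewrite author's own statement) =====
-- stated objective: simpler
-- what changed: Replaces the 9-iteration nested index loop with per-cell bounds checks by slicing the clamped window out of the matrix (rows = M[max(0,x-1):x+2], cells = row[max(0,y-1):min(y+2,n)]) and summing/counting the slices.
import Mathlib
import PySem

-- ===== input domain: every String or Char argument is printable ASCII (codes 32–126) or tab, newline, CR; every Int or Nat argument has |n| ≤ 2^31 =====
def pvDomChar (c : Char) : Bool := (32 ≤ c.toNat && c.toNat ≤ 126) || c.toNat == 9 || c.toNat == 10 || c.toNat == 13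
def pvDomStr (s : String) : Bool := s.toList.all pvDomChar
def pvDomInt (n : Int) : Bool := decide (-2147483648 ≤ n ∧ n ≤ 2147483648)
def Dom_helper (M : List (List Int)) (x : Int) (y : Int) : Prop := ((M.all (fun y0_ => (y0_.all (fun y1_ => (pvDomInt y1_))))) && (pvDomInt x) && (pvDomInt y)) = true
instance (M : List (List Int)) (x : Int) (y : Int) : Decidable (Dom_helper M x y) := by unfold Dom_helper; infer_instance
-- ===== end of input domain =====

-- B replaces A's 9-iteration nested loop with per-cell bounds checks by slicing the
-- clamped 3x3 window out of the matrix row by row (objective: simpler).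

-- ===== PORT A =====
-- len(M[0]) raises IndexError on M = []; such inputs are outside Pre_helper, so the
-- port reads M[0] with a default.  M[x+i][y+j] is only evaluated after the bounds
-- guard, hence with a nonnegative in-range row index; pyGetD with default is exact there.
def helper (M : List (List Int)) (x : Int) (y : Int) : Int :=
  let sc : Int × Int := (PySem.List.pyRange (-1) 2 1).foldl (fun sc i =>
      (PySem.List.pyRange (-1) 2 1).foldl (fun (sc : Int × Int) j =>
        if x + i < 0 ∨ x + i ≥ (M.length : Int) ∨ y + j < 0 ∨
           y + j ≥ (((PySem.List.pyGet? M 0).getD []).length : Int) then sc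
        else (sc.1 + PySem.List.pyGetD (PySem.List.pyGetD M (x + i) []) (y + j) 0, sc.2 + 1)) sc)
    ((0, 0) : Int × Int)
  PySem.Int.floordiv sc.1 sc.2

-- ===== PORT B =====
def helper_alt (M : List (List Int)) (x : Int) (y : Int) : Int :=
  let n : Int := (((PySem.List.pyGet? M 0).getD []).length : Int)
  let tc : Int × Int := (PySem.List.slice M (some (max 0 (x - 1))) (some (x + 2))).foldl
      (fun (tc : Int × Int) row =>
        let cells := PySem.List.slice row (some (max 0 (y - 1))) (some (min (y + 2) n))
        (tc.1 + cells.sum, tc.2 + (cells.length : Int))) ((0, 0) : Int × Int)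
  PySem.Int.floordiv tc.1 tc.2

-- ===== PRECONDITION & SPEC =====
-- Pre_helper holds exactly where the Python A returns: it excludes only inputs on which
-- A raises — IndexError on M = [] or on an accessed row shorter than the column window,
-- and ZeroDivisionError when the clamped 3x3 window contains no cell.
def Pre_helper (M : List (List Int)) (x : Int) (y : Int) : Prop :=
  M ≠ [] ∧ 1 ≤ ((M.headD []).length : Int) ∧
  -1 ≤ x ∧ x ≤ (M.length : Int) ∧ -1 ≤ y ∧ y ≤ ((M.headD []).length : Int) ∧
  ∀ row ∈ PySem.List.slice M (some (max 0 (x - 1))) (some (x + 2)),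
    min (y + 2) ((M.headD []).length : Int) ≤ (row.length : Int)
instance (M : List (List Int)) (x : Int) (y : Int) : Decidable (Pre_helper M x y) := by
  unfold Pre_helper; infer_instance
def pvWitness_helper : List (List Int) × Int × Int := ([[1, 2], [3, 4]], 0, 1)
def Spec_helper (M : List (List Int)) (x : Int) (y : Int) (out : Int) : Prop := out = helper_alt M x y
instance (M : List (List Int)) (x : Int) (y : Int) (out : Int) : Decidable (Spec_helper M x y out) := by unfold Spec_helper; infer_instance

-- ===== CLAIM (what is proved, stated in full; the proofs are below) =====
def Claim_equal_helper : Prop := ∀ (M : List (List Int)) (x : Int) (y : Int), Dom_helper M x y → Pre_helper M x y → Spec_helper M x y (helper M x y)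

-- ===== LEMMAS AND PROOFS =====

-- the column window B cuts out of one row
def cellsOf (n y : Int) (row : List Int) : List Int :=
  PySem.List.slice row (some (max 0 (y - 1))) (some (min (y + 2) n))

-- drop/take segments as explicit lists
theorem dt1 {α : Type} (L : List α) (d : α) (a : Nat) (h : a < L.length) :
    (L.drop a).take 1 = [L.getD a d] := by
  rw [List.getD_eq_getElem L d h, List.drop_eq_getElem_cons h]
  rfl

theorem dt2 {α : Type} (L : List α) (d : α) (a : Nat) (h : a + 1 < L.length) :
    (L.drop a).take 2 = [L.getD a d, L.getD (a + 1) d] := by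
  rw [List.getD_eq_getElem L d (by omega), List.getD_eq_getElem L d h,
    List.drop_eq_getElem_cons (show a < L.length by omega), List.drop_eq_getElem_cons h]
  rfl

theorem dt3 {α : Type} (L : List α) (d : α) (a : Nat) (h : a + 2 < L.length) :
    (L.drop a).take 3 = [L.getD a d, L.getD (a + 1) d, L.getD (a + 2) d] := by
  rw [List.getD_eq_getElem L d (by omega), List.getD_eq_getElem L d (by omega),
    List.getD_eq_getElem L d h,
    List.drop_eq_getElem_cons (show a < L.length by omega),
    List.drop_eq_getElem_cons (show a + 1 < L.length by omega),
    List.drop_eq_getElem_cons h]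
  rfl

theorem dl1 {α : Type} (L : List α) (d : α) (a : Nat) (h : L.length = a + 1) :
    L.drop a = [L.getD a d] := by
  rw [List.getD_eq_getElem L d (by omega), List.drop_eq_getElem_cons (show a < L.length by omega),
    List.drop_eq_nil_of_le (by omega)]

theorem dl2 {α : Type} (L : List α) (d : α) (a : Nat) (h : L.length = a + 2) :
    L.drop a = [L.getD a d, L.getD (a + 1) d] := by
  rw [List.getD_eq_getElem L d (by omega), List.getD_eq_getElem L d (by omega),
    List.drop_eq_getElem_cons (show a < L.length by omega),
    List.drop_eq_getElem_cons (show a + 1 < L.length by omega),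
    List.drop_eq_nil_of_le (by omega)]

theorem mem_dt {α : Type} (L : List α) (d : α) (a c k : Nat)
    (h1 : a ≤ k) (h2 : k < a + c) (h3 : k < L.length) :
    L.getD k d ∈ (L.drop a).take c := by
  have hlt : k - a < ((L.drop a).take c).length := by
    simp only [List.length_take, List.length_drop]; omega
  have hm := List.getElem_mem hlt
  rw [List.getElem_take, List.getElem_drop] at hm
  rw [List.getD_eq_getElem L d h3]
  convert hm using 2
  all_goals omega

-- A's inner loop over j, when the row index is in range, contributes the cells slice
theorem innerA (row : List Int) (mlen n y v : Int) (sc : Int × Int)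
    (hv0 : 0 ≤ v) (hv1 : v < mlen) (hn : 1 ≤ n) (hy0 : -1 ≤ y) (hy1 : y ≤ n)
    (hl : min (y + 2) n ≤ (row.length : Int)) :
    List.foldl (fun (sc : Int × Int) j =>
      if v < 0 ∨ v ≥ mlen ∨ y + j < 0 ∨ y + j ≥ n then sc
      else (sc.1 + PySem.List.pyGetD row (y + j) 0, sc.2 + 1)) sc [-1, 0, 1]
    = (sc.1 + (cellsOf n y row).sum, sc.2 + ((cellsOf n y row).length : Int)) := by
  unfold cellsOf
  rw [PySem.List.slice_toNat row (a := max 0 (y - 1)) (b := min (y + 2) n) (by omega) (by omega)]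
  simp only [List.foldl_cons, List.foldl_nil]
  rcases (by omega : y = -1 ∨ (y = 0 ∧ n = 1) ∨ (y = 0 ∧ 2 ≤ n) ∨ (1 ≤ y ∧ y ≤ n - 2) ∨
      (1 ≤ y ∧ y = n - 1) ∨ (1 ≤ y ∧ y = n)) with hc | hc | hc | hc | hc | hc
  · -- y = -1 : only j = 1 lands in range, at column 0
    rw [if_neg (by omega), if_pos (by omega), if_pos (by omega),
      show (max 0 (y - 1)).toNat = 0 from by omega,
      show (min (y + 2) n).toNat - (0 : Nat) = 1 from by omega,
      dt1 row 0 0 (by omega), show y + 1 = ((0 : Nat) : Int) from by omega,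
      PySem.List.pyGetD_natCast]
    simp
  · -- y = 0, n = 1 : only j = 0
    rw [if_pos (by omega), if_neg (by omega), if_pos (by omega),
      show (max 0 (y - 1)).toNat = 0 from by omega,
      show (min (y + 2) n).toNat - (0 : Nat) = 1 from by omega,
      dt1 row 0 0 (by omega), show y + 0 = ((0 : Nat) : Int) from by omega,
      PySem.List.pyGetD_natCast]
    simp
  · -- y = 0, 2 ≤ n : j = 0 and j = 1, columns 0 and 1
    rw [if_neg (by omega), if_neg (by omega), if_pos (by omega),
      show (max 0 (y - 1)).toNat = 0 from by omega,
      show (min (y + 2) n).toNat - (0 : Nat) = 2 from by omega,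
      dt2 row 0 0 (by omega), show y + 0 = ((0 : Nat) : Int) from by omega,
      show y + 1 = (((0 : Nat) + 1 : Nat) : Int) from by omega]
    simp only [PySem.List.pyGetD_natCast]
    simp
    constructor <;> ring
  · -- 1 ≤ y ≤ n - 2 : all three columns
    rw [if_neg (by omega), if_neg (by omega), if_neg (by omega),
      show (min (y + 2) n).toNat - (max 0 (y - 1)).toNat = 3 from by omega,
      dt3 row 0 _ (by omega),
      show y + -1 = (((max 0 (y - 1)).toNat : Nat) : Int) from by omega,
      show y + 0 = (((max 0 (y - 1)).toNat + 1 : Nat) : Int) from by omega,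
      show y + 1 = (((max 0 (y - 1)).toNat + 2 : Nat) : Int) from by omega]
    simp only [PySem.List.pyGetD_natCast]
    simp
    constructor <;> ring
  · -- y = n - 1 (y ≥ 1) : j = -1 and j = 0
    rw [if_pos (by omega), if_neg (by omega), if_neg (by omega),
      show (min (y + 2) n).toNat - (max 0 (y - 1)).toNat = 2 from by omega,
      dt2 row 0 _ (by omega),
      show y + -1 = (((max 0 (y - 1)).toNat : Nat) : Int) from by omega,
      show y + 0 = (((max 0 (y - 1)).toNat + 1 : Nat) : Int) from by omega]
    simp only [PySem.List.pyGetD_natCast]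
    simp
    constructor <;> ring
  · -- y = n : only j = -1, at column n - 1
    rw [if_pos (by omega), if_pos (by omega), if_neg (by omega),
      show (min (y + 2) n).toNat - (max 0 (y - 1)).toNat = 1 from by omega,
      dt1 row 0 _ (by omega),
      show y + -1 = (((max 0 (y - 1)).toNat : Nat) : Int) from by omega,
      PySem.List.pyGetD_natCast]
    simp

-- A's inner loop contributes nothing when the row index is out of range
theorem innerSkip (row : List Int) (mlen n y v : Int) (sc : Int × Int)
    (h : v < 0 ∨ v ≥ mlen) :
    List.foldl (fun (sc : Int × Int) j =>
      if v < 0 ∨ v ≥ mlen ∨ y + j < 0 ∨ y + j ≥ n then sc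
      else (sc.1 + PySem.List.pyGetD row (y + j) 0, sc.2 + 1)) sc [-1, 0, 1] = sc := by
  simp only [List.foldl_cons, List.foldl_nil]
  rw [if_pos (by tauto), if_pos (by tauto), if_pos (by tauto)]

-- the two accumulating folds agree
theorem outer_eq (M : List (List Int)) (x y : Int)
    (hM : M ≠ []) (hn1 : 1 ≤ ((M.headD []).length : Int))
    (hx0 : -1 ≤ x) (hx1 : x ≤ (M.length : Int))
    (hy0 : -1 ≤ y) (hy1 : y ≤ ((M.headD []).length : Int))
    (hlen : ∀ row ∈ PySem.List.slice M (some (max 0 (x - 1))) (some (x + 2)),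
      min (y + 2) ((M.headD []).length : Int) ≤ (row.length : Int)) :
    List.foldl (fun sc i =>
      List.foldl (fun (sc : Int × Int) j =>
        if x + i < 0 ∨ x + i ≥ (M.length : Int) ∨ y + j < 0 ∨
           y + j ≥ ((M.headD []).length : Int) then sc
        else (sc.1 + PySem.List.pyGetD (PySem.List.pyGetD M (x + i) []) (y + j) 0, sc.2 + 1)) sc
        [-1, 0, 1]) ((0, 0) : Int × Int) [-1, 0, 1]
    = List.foldl (fun (tc : Int × Int) row =>
        (tc.1 + (cellsOf ((M.headD []).length : Int) y row).sum,
         tc.2 + ((cellsOf ((M.headD []).length : Int) y row).length : Int)))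
      ((0, 0) : Int × Int) (PySem.List.slice M (some (max 0 (x - 1))) (some (x + 2))) := by
  have hm1 : 1 ≤ (M.length : Int) := by
    cases M with
    | nil => exact absurd rfl hM
    | cons r T => simp
  have hstep : ∀ (sc : Int × Int) (i : Int), i ∈ ([-1, 0, 1] : List Int) →
      List.foldl (fun (sc : Int × Int) j =>
        if x + i < 0 ∨ x + i ≥ (M.length : Int) ∨ y + j < 0 ∨
           y + j ≥ ((M.headD []).length : Int) then sc
        else (sc.1 + PySem.List.pyGetD (PySem.List.pyGetD M (x + i) []) (y + j) 0, sc.2 + 1)) sc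
        [-1, 0, 1]
      = (if 0 ≤ x + i ∧ x + i < (M.length : Int) then
          (sc.1 + (cellsOf ((M.headD []).length : Int) y (M.getD (x + i).toNat [])).sum,
           sc.2 + ((cellsOf ((M.headD []).length : Int) y (M.getD (x + i).toNat [])).length : Int))
         else sc) := by
    intro sc i hi
    have hi' : -1 ≤ i ∧ i ≤ 1 := by
      simp only [List.mem_cons, List.not_mem_nil, or_false] at hi
      rcases hi with rfl | rfl | rfl <;> omega
    by_cases hv : 0 ≤ x + i ∧ x + i < (M.length : Int)
    · rw [if_pos hv]
      have hmem : M.getD (x + i).toNat [] ∈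
          PySem.List.slice M (some (max 0 (x - 1))) (some (x + 2)) := by
        rw [PySem.List.slice_toNat M (a := max 0 (x - 1)) (b := x + 2) (by omega) (by omega)]
        exact mem_dt M [] _ _ _ (by omega) (by omega) (by omega)
      have hl := hlen _ hmem
      have hrow : PySem.List.pyGetD M (x + i) [] = M.getD (x + i).toNat [] := by
        have h := PySem.List.pyGetD_natCast M (x + i).toNat ([] : List Int)
        rwa [show (((x + i).toNat : Nat) : Int) = x + i from by omega] at h
      rw [← hrow] at hl ⊢
      exact innerA _ _ _ _ _ _ hv.1 hv.2 hn1 hy0 hy1 hl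
    · rw [if_neg hv]
      exact innerSkip _ _ _ _ _ _ (by omega)
  rw [List.foldl_ext _ _ _ hstep]
  rcases (by omega : x = -1 ∨ (x = 0 ∧ (M.length : Int) = 1) ∨ (x = 0 ∧ 2 ≤ (M.length : Int)) ∨
      (1 ≤ x ∧ x ≤ (M.length : Int) - 2) ∨ (1 ≤ x ∧ x = (M.length : Int) - 1 ∧ 2 ≤ (M.length : Int)) ∨
      (1 ≤ x ∧ x = (M.length : Int))) with hc | hc | hc | hc | hc | hc
  · -- x = -1 : one row, index 0
    rw [show PySem.List.slice M (some (max 0 (x - 1))) (some (x + 2)) = [M.getD 0 []] from by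
      rw [PySem.List.slice_toNat M (a := max 0 (x - 1)) (b := x + 2) (by omega) (by omega),
        show (max 0 (x - 1)).toNat = 0 from by omega,
        show (x + 2).toNat - (0 : Nat) = 1 from by omega]
      exact dt1 M [] 0 (by omega)]
    simp only [List.foldl_cons, List.foldl_nil]
    rw [if_pos (by omega), if_neg (by omega), if_neg (by omega),
      show (x + 1).toNat = 0 from by omega]
  · -- x = 0, one row : index 0
    rw [show PySem.List.slice M (some (max 0 (x - 1))) (some (x + 2)) = [M.getD 0 []] from by
      rw [PySem.List.slice_toNat M (a := max 0 (x - 1)) (b := x + 2) (by omega) (by omega),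
        show (max 0 (x - 1)).toNat = 0 from by omega,
        show (x + 2).toNat - (0 : Nat) = 2 from by omega,
        dl1 M [] 0 (by omega)]
      rfl]
    simp only [List.foldl_cons, List.foldl_nil]
    rw [if_neg (by omega), if_pos (by omega), if_neg (by omega),
      show (x + 0).toNat = 0 from by omega]
  · -- x = 0, at least two rows : indices 0, 1
    rw [show PySem.List.slice M (some (max 0 (x - 1))) (some (x + 2)) =
        [M.getD 0 [], M.getD (0 + 1) []] from by
      rw [PySem.List.slice_toNat M (a := max 0 (x - 1)) (b := x + 2) (by omega) (by omega),
        show (max 0 (x - 1)).toNat = 0 from by omega,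
        show (x + 2).toNat - (0 : Nat) = 2 from by omega]
      exact dt2 M [] 0 (by omega)]
    simp only [List.foldl_cons, List.foldl_nil]
    rw [if_pos (by omega), if_pos (by omega), if_neg (by omega),
      show (x + 0).toNat = 0 from by omega,
      show (x + 1).toNat = 0 + 1 from by omega]
  · -- middle rows : indices x-1, x, x+1
    rw [show PySem.List.slice M (some (max 0 (x - 1))) (some (x + 2)) =
        [M.getD (x - 1).toNat [], M.getD ((x - 1).toNat + 1) [], M.getD ((x - 1).toNat + 2) []] from by
      rw [PySem.List.slice_toNat M (a := max 0 (x - 1)) (b := x + 2) (by omega) (by omega),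
        show (max 0 (x - 1)).toNat = (x - 1).toNat from by omega,
        show (x + 2).toNat - (x - 1).toNat = 3 from by omega]
      exact dt3 M [] _ (by omega)]
    simp only [List.foldl_cons, List.foldl_nil]
    rw [if_pos (by omega), if_pos (by omega), if_pos (by omega),
      show (x + -1).toNat = (x - 1).toNat from by omega,
      show (x + 0).toNat = (x - 1).toNat + 1 from by omega,
      show (x + 1).toNat = (x - 1).toNat + 2 from by omega]
  · -- x = m - 1 (m ≥ 2) : indices x-1, x
    rw [show PySem.List.slice M (some (max 0 (x - 1))) (some (x + 2)) =
        [M.getD (x - 1).toNat [], M.getD ((x - 1).toNat + 1) []] from by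
      rw [PySem.List.slice_toNat M (a := max 0 (x - 1)) (b := x + 2) (by omega) (by omega),
        show (max 0 (x - 1)).toNat = (x - 1).toNat from by omega,
        show (x + 2).toNat - (x - 1).toNat = 3 from by omega,
        dl2 M [] _ (by omega)]
      rfl]
    simp only [List.foldl_cons, List.foldl_nil]
    rw [if_neg (by omega), if_pos (by omega), if_pos (by omega),
      show (x + -1).toNat = (x - 1).toNat from by omega,
      show (x + 0).toNat = (x - 1).toNat + 1 from by omega]
  · -- x = m : one row, index x-1
    rw [show PySem.List.slice M (some (max 0 (x - 1))) (some (x + 2)) =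
        [M.getD (x - 1).toNat []] from by
      rw [PySem.List.slice_toNat M (a := max 0 (x - 1)) (b := x + 2) (by omega) (by omega),
        show (max 0 (x - 1)).toNat = (x - 1).toNat from by omega,
        show (x + 2).toNat - (x - 1).toNat = 3 from by omega,
        dl1 M [] _ (by omega)]
      rfl]
    simp only [List.foldl_cons, List.foldl_nil]
    rw [if_neg (by omega), if_neg (by omega), if_pos (by omega),
      show (x + -1).toNat = (x - 1).toNat from by omega]

-- ===== VERDICT (by name: the statement is the Claim_ definition above) =====
theorem helper_spec : Claim_equal_helper := by
  intro M x y _ hpre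
  obtain ⟨hM, hn1, hx0, hx1, hy0, hy1, hlen⟩ := hpre
  have hn0 : (PySem.List.pyGet? M 0).getD [] = M.headD [] := by
    cases M with
    | nil => exact absurd rfl hM
    | cons r T => simp
  have hR : PySem.List.pyRange (-1) 2 1 = [-1, 0, 1] := by decide
  unfold Spec_helper helper helper_alt
  simp only [hn0, hR]
  rw [outer_eq M x y hM hn1 hx0 hx1 hy0 hy1 hlen]
  rfl
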